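-- pv_equiv track=rewrite | github.com/WeLiveToServe/ebay-posting-automation | CL_append_input_arg_excel.py | build_row
-- ===== SOURCE A (Python) =====
-- from collections.abc import Mapping
-- from typing import Any
--
-- DEFAULT_VALUES = {
--     "*Action(SiteID=US|Country=US|Currency=USD|Version=1193)": "Add",
--     "Category ID": "261186",
--     "Category name": "/Books & Magazines/Books",
--     "Start price": "5.00",
--     "Quantity": 1,
--     "Item photo URL": "https://keith-ebay-images.s3.us-east-2.amazonaws.com/IMG_4929.JPG",
--     "Condition ID": "5000-Good",
--     "Format": "FixedPrice",
--     "Duration": "GTC",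
--     "Location": "Newfields, NH",
--     "Shipping profile name": "USPS Media Mail",
--     "Return profile name": "Returns allowed within 30 days",
--     "Payment profile name": "Immediate payment managed via eBay",
--     "C:Language": "English",
-- }
--
-- FORCED_BLANK_HEADERS = {
--     "Max dispatch time",
--     "Returns accepted option",
--     "Returns within option",
--     "Refund option",
--     "Return shipping cost paid by",
-- }
--
-- JSON_FIELD_MAP = {
--     "title": "Title",
--     "author": "C:Author",
--     "edition": "C:Edition",
--     "year": "C:Publication Year",
--     "publisher": "C:Publisher",
-- }
--
-- def normalise_text(value: Any) -> str:
--     if value is None: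
--         return ""
--     text = str(value)
--     replacements = {
--         "\uFFFD": "'",
--         "’": "'",
--         "“": '"',
--         "”": '"',
--         "–": "-",
--         "—": "-",
--         "…": "...",
--         "•": "-",
--         "©": "(c)",
--         "�": "'",
--     }
--     for bad, good in replacements.items():
--         text = text.replace(bad, good)
--     return text.strip()
--
-- def build_description(payload: Mapping[str, Any]) -> str:
--     blurb = normalise_text(payload.get("blurb"))
--     condition = normalise_text(payload.get("condition"))
--     details = normalise_text(payload.get("details"))
--     sections: list[str] = []
--     if blurb:
--         sections.append(blurb)
--     if condition:
--         sections.append(f"Condition Notes:\n{condition}")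
--     if details:
--         sections.append(f"Collector Details:\n{details}")
--     return "\n\n".join(sections)
--
-- def build_row(header_order: list[str], payload: Mapping[str, Any]) -> dict[str, Any]:
--     row = {header: "" for header in header_order}
--     row.update({key: value for key, value in DEFAULT_VALUES.items() if key in row})
--
--     payload_lower = {str(key).lower(): value for key, value in payload.items()}
--     for json_field, header in JSON_FIELD_MAP.items():
--         if header in row:
--             row[header] = normalise_text(payload_lower.get(json_field))
--
--     if "Title" in row:
--         row["Title"] = row.get("Title", "")
--     if "C:Book Title" in row:
--         row["C:Book Title"] = row.get("Title", "")
--     if "Description" in row: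
--         row["Description"] = build_description(payload_lower)
--
--     for blank_header in FORCED_BLANK_HEADERS:
--         if blank_header in row:
--             row[blank_header] = ""
--
--     return row
-- ===== SOURCE B (Python) =====
-- from collections.abc import Mapping
-- from typing import Any
--
-- DEFAULT_VALUES = {
--     "*Action(SiteID=US|Country=US|Currency=USD|Version=1193)": "Add",
--     "Category ID": "261186",
--     "Category name": "/Books & Magazines/Books",
--     "Start price": "5.00",
--     "Quantity": 1,
--     "Item photo URL": "https://keith-ebay-images.s3.us-east-2.amazonaws.com/IMG_4929.JPG",
--     "Condition ID": "5000-Good",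
--     "Format": "FixedPrice",
--     "Duration": "GTC",
--     "Location": "Newfields, NH",
--     "Shipping profile name": "USPS Media Mail",
--     "Return profile name": "Returns allowed within 30 days",
--     "Payment profile name": "Immediate payment managed via eBay",
--     "C:Language": "English",
-- }
--
-- FORCED_BLANK_HEADERS = {
--     "Max dispatch time",
--     "Returns accepted option",
--     "Returns within option",
--     "Refund option",
--     "Return shipping cost paid by",
-- }
--
-- JSON_FIELD_MAP = {
--     "title": "Title",
--     "author": "C:Author",
--     "edition": "C:Edition",
--     "year": "C:Publication Year",
--     "publisher": "C:Publisher",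
-- }
--
-- HEADER_TO_JSON = {header: field for field, header in JSON_FIELD_MAP.items()}
--
-- def normalise_text(value: Any) -> str:
--     if value is None:
--         return ""
--     text = str(value)
--     replacements = {
--         "\uFFFD": "'",
--         "’": "'",
--         "“": '"',
--         "”": '"',
--         "–": "-",
--         "—": "-",
--         "…": "...",
--         "•": "-",
--         "©": "(c)",
--         "�": "'",
--     }
--     for bad, good in replacements.items():
--         text = text.replace(bad, good)
--     return text.strip()
--
-- def build_description(payload: Mapping[str, Any]) -> str:
--     blurb = normalise_text(payload.get("blurb"))
--     condition = normalise_text(payload.get("condition"))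
--     details = normalise_text(payload.get("details"))
--     sections: list[str] = []
--     if blurb:
--         sections.append(blurb)
--     if condition:
--         sections.append(f"Condition Notes:\n{condition}")
--     if details:
--         sections.append(f"Collector Details:\n{details}")
--     return "\n\n".join(sections)
--
-- def build_row(header_order: list[str], payload: Mapping[str, Any]) -> dict[str, Any]:
--     payload_lower = {str(key).lower(): value for key, value in payload.items()}
--     title_value = (
--         normalise_text(payload_lower.get("title")) if "Title" in header_order else ""
--     )
--
--     def value_for(header: str) -> Any:
--         if header in FORCED_BLANK_HEADERS:
--             return ""
--         if header == "Description":
--             return build_description(payload_lower)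
--         if header == "C:Book Title":
--             return title_value
--         json_field = HEADER_TO_JSON.get(header)
--         if json_field is not None:
--             return normalise_text(payload_lower.get(json_field))
--         return DEFAULT_VALUES.get(header, "")
--
--     return {header: value_for(header) for header in header_order}
-- ===== Notes on version B (the rewrite author's own statement) =====
-- stated objective: alternative
-- what changed: Replaces A's five sequential overwrite passes over a pre-blanked row dict with a single classifying pass: one dict comprehension over header_order that computes each header's value via an ordered rule chain (forced-blank, Description, C:Book Title, JSON-mapped field via a reversed header->field index, default, else empty).
-- outside the precondition, e.g. on build_row(['Quantity'], {}): A returns {'Quantity': 1}, B returns {'Quantity': 1}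
import Mathlib
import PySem

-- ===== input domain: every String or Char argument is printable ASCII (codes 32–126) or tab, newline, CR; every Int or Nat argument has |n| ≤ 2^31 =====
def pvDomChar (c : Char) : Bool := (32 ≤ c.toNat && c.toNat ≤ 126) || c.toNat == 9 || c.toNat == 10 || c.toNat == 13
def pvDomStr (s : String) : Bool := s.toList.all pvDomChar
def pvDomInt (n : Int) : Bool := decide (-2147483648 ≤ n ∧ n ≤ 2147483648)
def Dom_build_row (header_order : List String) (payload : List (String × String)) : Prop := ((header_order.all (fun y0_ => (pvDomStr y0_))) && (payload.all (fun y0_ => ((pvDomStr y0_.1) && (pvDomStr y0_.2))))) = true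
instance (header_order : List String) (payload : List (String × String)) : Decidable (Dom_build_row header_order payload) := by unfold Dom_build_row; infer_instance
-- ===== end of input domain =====

-- B replaces A's five sequential overwrite passes over a pre-blanked row dict with a single
-- classifying pass over header_order (one value-rule chain per header); same cost, return value only.

-- shared module-level constants (DEFAULT_VALUES, FORCED_BLANK_HEADERS, JSON_FIELD_MAP)
def pvDefaults : List (String × String) := [
  ("*Action(SiteID=US|Country=US|Currency=USD|Version=1193)", "Add"),
  ("Category ID", "261186"),
  ("Category name", "/Books & Magazines/Books"),
  ("Start price", "5.00"),
  ("Quantity", "1"),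
  ("Item photo URL", "https://keith-ebay-images.s3.us-east-2.amazonaws.com/IMG_4929.JPG"),
  ("Condition ID", "5000-Good"),
  ("Format", "FixedPrice"),
  ("Duration", "GTC"),
  ("Location", "Newfields, NH"),
  ("Shipping profile name", "USPS Media Mail"),
  ("Return profile name", "Returns allowed within 30 days"),
  ("Payment profile name", "Immediate payment managed via eBay"),
  ("C:Language", "English")]

def pvForcedBlank : List String :=
  ["Max dispatch time", "Returns accepted option", "Returns within option", "Refund option",
   "Return shipping cost paid by"]

def pvJsonFieldMap : List (String × String) :=
  [("title", "Title"), ("author", "C:Author"), ("edition", "C:Edition"),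
   ("year", "C:Publication Year"), ("publisher", "C:Publisher")]

-- normalise_text applied to dict.get(...) (None → ""); the replace chain is Python's
-- replacements dict in iteration order (its two '\uFFFD' keys collapse to one entry).
def pvNormOpt (v : Option String) : String :=
  match v with
  | none => ""
  | some t =>
    PySem.Str.strip
      (PySem.Str.replace
        (PySem.Str.replace
          (PySem.Str.replace
            (PySem.Str.replace
              (PySem.Str.replace
                (PySem.Str.replace
                  (PySem.Str.replace
                    (PySem.Str.replace
                      (PySem.Str.replace t "\uFFFD" "'")
                      "’" "'")
                    "“" "\"")
                  "”" "\"")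
                "–" "-")
              "—" "-")
            "…" "...")
          "•" "-")
        "©" "(c)")

-- build_description (shared helper of both Pythons), step for step
def pvBuildDescription (payload_lower : PySem.Dict String String) : String :=
  let blurb := pvNormOpt (payload_lower.get? "blurb")
  let condition := pvNormOpt (payload_lower.get? "condition")
  let details := pvNormOpt (payload_lower.get? "details")
  let sections : List String := []
  let sections := if blurb ≠ "" then sections ++ [blurb] else sections
  let sections := if condition ≠ "" then sections ++ ["Condition Notes:\n" ++ condition] else sections
  let sections := if details ≠ "" then sections ++ ["Collector Details:\n" ++ details] else sections
  PySem.Str.join "\n\n" sections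

-- ===== PORT A ===== (five sequential passes over the row dict)
def build_row (header_order : List String) (payload : List (String × String)) : List (String × String) :=
  let row := header_order.foldl (fun d h => d.insert h "") PySem.Dict.empty
  let row := row.update (pvDefaults.filter (fun kv => row.contains kv.1))
  let payload_lower := payload.foldl (fun d kv => d.insert (PySem.Str.lower kv.1) kv.2) PySem.Dict.empty
  let row := pvJsonFieldMap.foldl
    (fun d fh => if d.contains fh.2 then d.insert fh.2 (pvNormOpt (payload_lower.get? fh.1)) else d) row
  let row := if row.contains "Title" then row.insert "Title" (row.getD "Title" "") else row
  let row := if row.contains "C:Book Title" then row.insert "C:Book Title" (row.getD "Title" "") else row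
  let row := if row.contains "Description" then row.insert "Description" (pvBuildDescription payload_lower) else row
  let row := pvForcedBlank.foldl (fun d h => if d.contains h then d.insert h "" else d) row
  row.items

-- ===== PORT B ===== (one classifying pass: a value rule per header)
def pvHeaderToJson : PySem.Dict String String :=
  PySem.Dict.ofList (pvJsonFieldMap.map (fun fh => (fh.2, fh.1)))

def pvValueFor (payload_lower : PySem.Dict String String) (title_value : String) (header : String) : String :=
  if header ∈ pvForcedBlank then ""
  else if header = "Description" then pvBuildDescription payload_lower
  else if header = "C:Book Title" then title_value
  else match pvHeaderToJson.get? header with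
    | some json_field => pvNormOpt (payload_lower.get? json_field)
    | none => (PySem.Dict.ofList pvDefaults).getD header ""

def build_row_alt (header_order : List String) (payload : List (String × String)) : List (String × String) :=
  let payload_lower := payload.foldl (fun d kv => d.insert (PySem.Str.lower kv.1) kv.2) PySem.Dict.empty
  let title_value := if "Title" ∈ header_order then pvNormOpt (payload_lower.get? "title") else ""
  (header_order.foldl (fun d h => d.insert h (pvValueFor payload_lower title_value h)) PySem.Dict.empty).items

-- ===== PRECONDITION & SPEC =====
-- Pre_ excludes header lists containing "Quantity": there Python A (and Python B alike) returns the
-- int 1 from DEFAULT_VALUES for that column, which is not a value of the declared str type.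
def Pre_build_row (header_order : List String) (payload : List (String × String)) : Prop :=
  "Quantity" ∉ header_order
instance (header_order : List String) (payload : List (String × String)) : Decidable (Pre_build_row header_order payload) := by unfold Pre_build_row; infer_instance
def pvWitness_build_row : List String × (List (String × String)) :=
  (["Title", "C:Book Title", "Description", "Category ID", "Max dispatch time"], [("Title", " A Book "), ("blurb", "Nice copy")])
def Spec_build_row (header_order : List String) (payload : List (String × String)) (out : List (String × String)) : Prop := out = build_row_alt header_order payload
instance (header_order : List String) (payload : List (String × String)) (out : List (String × String)) : Decidable (Spec_build_row header_order payload out) := by unfold Spec_build_row; infer_instance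

-- ===== CLAIM (what is proved, stated in full; the proofs are below) =====
def Claim_equal_build_row : Prop := ∀ (header_order : List String) (payload : List (String × String)), Dom_build_row header_order payload → Pre_build_row header_order payload → Spec_build_row header_order payload (build_row header_order payload)

-- ===== LEMMAS AND PROOFS =====

-- first-match association lookup is what Dict.get? does on raw items
theorem pvGet?_mk_eq_lookup (ps : List (String × String)) (k : String) :
    (PySem.Dict.mk ps).get? k = List.lookup k ps := by
  induction ps with
  | nil => simp [PySem.Dict.get?]
  | cons p rest ih =>
    obtain ⟨a, v⟩ := p
    by_cases h : a = k
    · simp [PySem.Dict.get?_mk_cons, List.lookup, h]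
    · have hba : (k == a) = false := by simp [Ne.symm h]
      simp [PySem.Dict.get?_mk_cons, List.lookup, h, hba, ih]

theorem pvLookup_const (l : List String) (c k : String) :
    List.lookup k (l.map (fun h => (h, c))) = if k ∈ l then some c else none := by
  induction l with
  | nil => simp
  | cons a rest ih =>
    by_cases h : k = a
    · simp [List.lookup, h]
    · have hba : (k == a) = false := by simp [h]
      simp [List.lookup, hba, ih, h]

theorem pvLookup_filter (ps : List (String × String)) (c : String → Bool) (k : String) :
    List.lookup k (ps.filter (fun kv => c kv.1)) = if c k then List.lookup k ps else none := by
  induction ps with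
  | nil => simp
  | cons p rest ih =>
    obtain ⟨a, v⟩ := p
    by_cases h : k = a
    · subst h
      by_cases hc : c k
      · simp [List.filter, hc, List.lookup, ih]
      · simp [List.filter, hc, List.lookup, ih,
          Bool.eq_false_iff.mpr hc]
    · have hba : (k == a) = false := by simp [h]
      by_cases hc : c a
      · simp [List.filter, hc, List.lookup, hba, ih]
      · simp [List.filter, hc, List.lookup, hba, ih]

theorem pvLookup_eq_none (ps : List (String × String)) (k : String)
    (h : k ∉ ps.map Prod.fst) : List.lookup k ps = none := by
  induction ps with
  | nil => simp
  | cons p rest ih =>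
    obtain ⟨a, v⟩ := p
    simp only [List.map, List.mem_cons, not_or] at h
    have hba : (k == a) = false := by simp [h.1]
    simp [List.lookup, hba, ih h.2]

-- contains is invariant under keys equality
theorem pvContains_eq_of_keys_eq {ν : Type} (d d' : PySem.Dict String ν) (k : String)
    (h : d'.keys = d.keys) : d'.contains k = d.contains k := by
  rw [PySem.Dict.contains_eq_decide_mem_keys, PySem.Dict.contains_eq_decide_mem_keys, h]

-- A's initial pass: blank value for every header
theorem pvGetD_foldl_insfun (l : List String) (f : String → String)
    (d : PySem.Dict String String) (k dflt : String) :
    (l.foldl (fun d h => d.insert h (f h)) d).getD k dflt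
      = if k ∈ l then f k else d.getD k dflt := by
  induction l generalizing d with
  | nil => simp
  | cons a rest ih =>
    simp only [List.foldl, ih]
    by_cases hm : k ∈ rest
    · simp [hm]
    · by_cases hk : k = a
      · simp [hm, hk, PySem.Dict.getD_insert]
      · simp [hm, hk, PySem.Dict.getD_insert]

-- A's update pass (unconditional inserts of an association list with distinct keys)
theorem pvGetD_foldl_ins (ps : List (String × String)) (d : PySem.Dict String String)
    (k dflt : String) (hn : (ps.map Prod.fst).Nodup) :
    (ps.foldl (fun d kv => d.insert kv.1 kv.2) d).getD k dflt
      = (List.lookup k ps).getD (d.getD k dflt) := by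
  induction ps generalizing d with
  | nil => simp
  | cons p rest ih =>
    obtain ⟨a, v⟩ := p
    simp only [List.map, List.nodup_cons] at hn
    by_cases hk : k = a
    · subst hk
      have hnone : List.lookup k rest = none := pvLookup_eq_none rest k hn.1
      simp [List.foldl, ih _ hn.2, hnone, List.lookup, PySem.Dict.getD_insert]
    · have hba : (k == a) = false := by simp [hk]
      simp [List.foldl, ih _ hn.2, List.lookup, hba, PySem.Dict.getD_insert, hk]

theorem pvKeys_foldl_ins (ps : List (String × String)) (d : PySem.Dict String String)
    (h : ∀ kv ∈ ps, d.contains kv.1 = true) :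
    (ps.foldl (fun d kv => d.insert kv.1 kv.2) d).keys = d.keys := by
  induction ps generalizing d with
  | nil => rfl
  | cons p rest ih =>
    obtain ⟨a, v⟩ := p
    have hc : d.contains a = true := h (a, v) (List.mem_cons_self ..)
    have hkeys : (d.insert a v).keys = d.keys := PySem.Dict.keys_insert_of_contains d v hc
    simp only [List.foldl]
    rw [ih (d.insert a v) (fun kv hkv => by
      rw [pvContains_eq_of_keys_eq d _ _ hkeys]
      exact h kv (List.mem_cons_of_mem _ hkv)), hkeys]

-- A's guarded overwrite passes (JSON fields, forced blanks)
theorem pvKeys_foldl_condins (ps : List (String × String)) (d : PySem.Dict String String) :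
    (ps.foldl (fun d kv => if d.contains kv.1 then d.insert kv.1 kv.2 else d) d).keys = d.keys := by
  induction ps generalizing d with
  | nil => rfl
  | cons p rest ih =>
    obtain ⟨a, v⟩ := p
    simp only [List.foldl]
    by_cases hc : d.contains a = true
    · rw [hc]
      simp only [if_true]
      rw [ih, PySem.Dict.keys_insert_of_contains d v hc]
    · simp only [Bool.eq_false_iff.mpr hc, if_false]
      exact ih d

theorem pvGetD_foldl_condins (ps : List (String × String)) (d : PySem.Dict String String)
    (k dflt : String) (hn : (ps.map Prod.fst).Nodup) :
    (ps.foldl (fun d kv => if d.contains kv.1 then d.insert kv.1 kv.2 else d) d).getD k dflt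
      = if d.contains k then (List.lookup k ps).getD (d.getD k dflt) else d.getD k dflt := by
  induction ps generalizing d with
  | nil => simp
  | cons p rest ih =>
    obtain ⟨a, v⟩ := p
    simp only [List.map, List.nodup_cons] at hn
    simp only [List.foldl]
    by_cases hca : d.contains a = true
    · rw [hca]
      simp only [if_true]
      have hkeys : (d.insert a v).keys = d.keys := PySem.Dict.keys_insert_of_contains d v hca
      rw [ih _ hn.2, pvContains_eq_of_keys_eq d _ k hkeys]
      by_cases hk : k = a
      · subst hk
        have hnone : List.lookup k rest = none := pvLookup_eq_none rest k hn.1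
        simp [hnone, List.lookup, PySem.Dict.getD_insert, hca]
      · have hba : (k == a) = false := by simp [hk]
        simp [List.lookup, hba, PySem.Dict.getD_insert, hk]
    · simp only [Bool.eq_false_iff.mpr hca, if_false]
      rw [ih _ hn.2]
      by_cases hck : d.contains k = true
      · have hk : k ≠ a := fun h => hca (h ▸ hck)
        have hba : (k == a) = false := by simp [hk]
        simp [hck, List.lookup, hba]
      · simp [Bool.eq_false_iff.mpr hck]

-- A's three single guarded overwrites
theorem pvKeys_condinsert (d : PySem.Dict String String) (key v : String) :
    (if d.contains key = true then d.insert key v else d).keys = d.keys := by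
  by_cases h : d.contains key = true
  · simp [h, PySem.Dict.keys_insert_of_contains d v h]
  · simp [h]

theorem pvGetD_condinsert (d : PySem.Dict String String) (key v k dflt : String) :
    (if d.contains key = true then d.insert key v else d).getD k dflt
      = if k = key ∧ d.contains key = true then v else d.getD k dflt := by
  by_cases hc : d.contains key = true <;> by_cases hk : k = key <;>
    simp [hc, hk, PySem.Dict.getD_insert]

theorem pvLookup_swap_map (ps : List (String × String)) (g : String → String) (k : String) :
    List.lookup k (ps.map (fun fh => (fh.2, g fh.1)))
      = (List.lookup k (ps.map (fun fh => (fh.2, fh.1)))).map g := by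
  induction ps with
  | nil => simp
  | cons p rest ih =>
    obtain ⟨f, h⟩ := p
    by_cases hk : k = h
    · simp [List.lookup, hk]
    · have hba : (k == h) = false := by simp [hk]
      simp [List.lookup, hba, ih]

theorem pvGetD_foldl_blank (l : List String) (d : PySem.Dict String String) (k dflt : String) :
    (l.foldl (fun d h => d.insert h "") d).getD k dflt
      = if k ∈ l then "" else d.getD k dflt :=
  pvGetD_foldl_insfun l (fun _ => "") d k dflt

-- the whole pointwise equality
set_option maxHeartbeats 1000000 in
theorem pv_main (ho : List String) (payload : List (String × String)) :
    build_row ho payload = build_row_alt ho payload := by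
  unfold build_row build_row_alt
  simp only []
  set PL := List.foldl (fun (d : PySem.Dict String String) kv => d.insert (PySem.Str.lower kv.1) kv.2) PySem.Dict.empty payload with hPL
  set r0 := List.foldl (fun (d : PySem.Dict String String) h => d.insert h "") PySem.Dict.empty ho with hr0
  set r1 := r0.update (List.filter (fun kv => r0.contains kv.1) pvDefaults) with hr1
  set r2 := List.foldl (fun (d : PySem.Dict String String) fh => if d.contains fh.2 = true then d.insert fh.2 (pvNormOpt (PL.get? fh.1)) else d) r1 pvJsonFieldMap with hr2
  set r3 := if r2.contains "Title" = true then r2.insert "Title" (r2.getD "Title" "") else r2 with hr3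
  set r4 := if r3.contains "C:Book Title" = true then r3.insert "C:Book Title" (r3.getD "Title" "") else r3 with hr4
  set r5 := if r4.contains "Description" = true then r4.insert "Description" (pvBuildDescription PL) else r4 with hr5
  set r6 := List.foldl (fun (d : PySem.Dict String String) h => if d.contains h = true then d.insert h "" else d) r5 pvForcedBlank with hr6
  set TV := if "Title" ∈ ho then pvNormOpt (PL.get? "title") else "" with hTV
  set rB := List.foldl (fun (d : PySem.Dict String String) h => d.insert h (pvValueFor PL TV h)) PySem.Dict.empty ho with hrB
  show r6.items = rB.items
  -- reshape the two guarded folds as folds over association lists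
  have hjs : r2 = List.foldl (fun d kv => if d.contains kv.1 = true then d.insert kv.1 kv.2 else d) r1 (pvJsonFieldMap.map (fun fh => (fh.2, pvNormOpt (PL.get? fh.1)))) := by
    rw [hr2, List.foldl_map]
  have hfb : r6 = List.foldl (fun d kv => if d.contains kv.1 = true then d.insert kv.1 kv.2 else d) r5 (pvForcedBlank.map (fun h => (h, ""))) := by
    rw [hr6, List.foldl_map]
  -- keys
  have hkeys0 : r0.keys = PySem.Set.update PySem.Dict.empty.keys ho :=
    PySem.Dict.keys_foldl_insert ho (fun _ _ => "") _
  have hmem0 : ∀ x, x ∈ r0.keys ↔ x ∈ ho := by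
    intro x
    rw [hkeys0, PySem.Dict.keys_empty]
    simp [PySem.Set.mem_update]
  have hc0 : ∀ x, r0.contains x = decide (x ∈ ho) := by
    intro x
    rw [PySem.Dict.contains_eq_decide_mem_keys]
    exact decide_eq_decide.mpr (hmem0 x)
  have hnodup0 : r0.keys.Nodup :=
    PySem.Dict.nodup_keys_foldl_insert ho (fun _ _ => "") _
      (by rw [PySem.Dict.keys_empty]; exact List.nodup_nil)
  have hk1 : r1.keys = r0.keys := by
    rw [hr1]
    exact pvKeys_foldl_ins _ r0 (fun kv hkv => (List.mem_filter.mp hkv).2)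
  have hk2 : r2.keys = r1.keys := by rw [hjs]; exact pvKeys_foldl_condins _ r1
  have hk3 : r3.keys = r2.keys := by rw [hr3]; exact pvKeys_condinsert r2 "Title" _
  have hk4 : r4.keys = r3.keys := by rw [hr4]; exact pvKeys_condinsert r3 "C:Book Title" _
  have hk5 : r5.keys = r4.keys := by rw [hr5]; exact pvKeys_condinsert r4 "Description" _
  have hk6 : r6.keys = r5.keys := by rw [hfb]; exact pvKeys_foldl_condins _ r5
  have hkeysA : r6.keys = r0.keys := by rw [hk6, hk5, hk4, hk3, hk2, hk1]
  have hkeysB : rB.keys = PySem.Set.update PySem.Dict.empty.keys ho :=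
    PySem.Dict.keys_foldl_insert ho (fun _ h => pvValueFor PL TV h) _
  have hnodupA : r6.keys.Nodup := by rw [hkeysA]; exact hnodup0
  have hnodupB : rB.keys.Nodup :=
    PySem.Dict.nodup_keys_foldl_insert ho (fun _ h => pvValueFor PL TV h) _
      (by rw [PySem.Dict.keys_empty]; exact List.nodup_nil)
  -- values, stage by stage
  have hg0 : ∀ x, r0.getD x "" = "" := by
    intro x
    rw [hr0, pvGetD_foldl_blank ho PySem.Dict.empty x "", PySem.Dict.getD_empty]
    simp
  have hg1 : ∀ x, r1.getD x "" = (if x ∈ ho then List.lookup x pvDefaults else none).getD "" := by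
    intro x
    have hn : ((List.filter (fun kv => r0.contains kv.1) pvDefaults).map Prod.fst).Nodup :=
      List.Sublist.nodup (List.Sublist.map Prod.fst List.filter_sublist) (by decide)
    have h := pvGetD_foldl_ins (List.filter (fun kv => r0.contains kv.1) pvDefaults) r0 x "" hn
    rw [pvLookup_filter pvDefaults (fun s => r0.contains s) x, hc0 x, hg0 x] at h
    rw [hr1]
    refine Eq.trans h ?_
    by_cases hx : x ∈ ho <;> simp [hx]
  have hnj : ((pvJsonFieldMap.map (fun fh => (fh.2, pvNormOpt (PL.get? fh.1)))).map Prod.fst).Nodup := by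
    have he : (pvJsonFieldMap.map (fun fh => (fh.2, pvNormOpt (PL.get? fh.1)))).map Prod.fst
        = pvJsonFieldMap.map (fun fh => fh.2) := by
      simp [List.map_map, Function.comp_def]
    rw [he]
    decide
  have hgT : r2.getD "Title" "" = TV := by
    rw [hjs, pvGetD_foldl_condins _ r1 "Title" "" hnj,
      pvContains_eq_of_keys_eq r0 r1 "Title" hk1, hc0, hg1,
      pvLookup_swap_map pvJsonFieldMap (fun f => pvNormOpt (PL.get? f)) "Title", hTV]
    by_cases hT : "Title" ∈ ho
    · simp [hT, pvJsonFieldMap, List.lookup]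
    · simp [hT]
  have hg2 : ∀ x, x ∈ ho → r2.getD x "" =
      ((List.lookup x (pvJsonFieldMap.map (fun fh => (fh.2, fh.1)))).map
        (fun f => pvNormOpt (PL.get? f))).getD ((List.lookup x pvDefaults).getD "") := by
    intro x hx
    rw [hjs, pvGetD_foldl_condins _ r1 x "" hnj,
      pvContains_eq_of_keys_eq r0 r1 x hk1, hc0, hg1,
      pvLookup_swap_map pvJsonFieldMap (fun f => pvNormOpt (PL.get? f)) x]
    simp [hx]
  have hg3 : ∀ x, r3.getD x "" = r2.getD x "" := by
    intro x
    rw [hr3, pvGetD_condinsert]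
    by_cases hx : x = "Title"
    · subst hx; simp
    · simp [hx]
  -- assemble
  rw [PySem.Dict.items_eq_map_keys r6 hnodupA "", PySem.Dict.items_eq_map_keys rB hnodupB "",
    hkeysA, hkeys0, hkeysB]
  apply List.map_congr_left
  intro k hkmem
  have hk : k ∈ ho := by
    rw [PySem.Dict.keys_empty] at hkmem
    simpa [PySem.Set.mem_update] using hkmem
  simp only [Prod.mk.injEq, true_and]
  have hB : rB.getD k "" = pvValueFor PL TV k := by
    rw [hrB, pvGetD_foldl_insfun ho (pvValueFor PL TV) PySem.Dict.empty k ""]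
    simp [hk]
  rw [hB]
  have hnfb : ((pvForcedBlank.map (fun h => (h, ("" : String)))).map Prod.fst).Nodup := by
    have he : (pvForcedBlank.map (fun h => (h, ("" : String)))).map Prod.fst
        = pvForcedBlank.map (fun h => h) := by
      simp [List.map_map, Function.comp_def]
    rw [he]
    decide
  rw [hfb, pvGetD_foldl_condins _ r5 k "" hnfb,
    pvContains_eq_of_keys_eq r0 r5 k (by rw [hk5, hk4, hk3, hk2, hk1]), hc0 k,
    pvLookup_const pvForcedBlank "" k]
  simp only [hk, decide_true, if_true]
  by_cases hfbk : k ∈ pvForcedBlank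
  · simp [hfbk, pvValueFor]
  · simp only [hfbk, if_false]
    rw [hr5, pvGetD_condinsert]
    by_cases hD : k = "Description"
    · have hcd : r4.contains "Description" = true := by
        rw [pvContains_eq_of_keys_eq r0 r4 _ (by rw [hk4, hk3, hk2, hk1]), hc0]
        subst hD
        simpa using hk
      subst hD
      simp [hcd, pvValueFor, pvForcedBlank]
    · simp only [hD, false_and, if_false]
      rw [hr4, pvGetD_condinsert]
      by_cases hC : k = "C:Book Title"
      · have hcc : r3.contains "C:Book Title" = true := by
          rw [pvContains_eq_of_keys_eq r0 r3 _ (by rw [hk3, hk2, hk1]), hc0]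
          subst hC
          simpa using hk
        subst hC
        simp only [hcc, and_true, if_pos rfl, true_and, if_true]
        rw [hg3 "Title", hgT]
        simp [pvValueFor, pvForcedBlank]
      · simp only [hC, false_and, if_false]
        rw [hg3 k, hg2 k hk]
        have hhtj : pvHeaderToJson.get? k
            = List.lookup k (pvJsonFieldMap.map (fun fh => (fh.2, fh.1))) := by
          rw [show pvHeaderToJson = PySem.Dict.mk (pvJsonFieldMap.map (fun fh => (fh.2, fh.1))) from by decide]
          exact pvGet?_mk_eq_lookup _ k
        have hdef : (PySem.Dict.ofList pvDefaults).getD k ""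
            = (List.lookup k pvDefaults).getD "" := by
          rw [PySem.Dict.getD_eq_get?_getD,
            show PySem.Dict.ofList pvDefaults = PySem.Dict.mk pvDefaults from by decide,
            pvGet?_mk_eq_lookup]
        simp only [pvValueFor, hfbk, hD, hC, if_false, hhtj, hdef]
        cases List.lookup k (pvJsonFieldMap.map (fun fh => (fh.2, fh.1))) <;> simp

-- ===== VERDICT (by name: the statement is the Claim_ definition above) =====
theorem build_row_spec : Claim_equal_build_row := by
  intro header_order payload _ _
  unfold Spec_build_row
  exact pv_main header_order payload
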